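-- pv_equiv track=rewrite | github.com/JohnDorsey/GeodeFractals | photo.py | trim_floats_in_str
-- ===== SOURCE A (Python) =====
-- def overwrite_matches_left(input_list, index, test_value, new_value):
--     # returns last (leftmost) changed index.
--     changeCount = 0
--     for i in range(index, -1, -1):
--         if input_list[i] == test_value:
--             input_list[i] = new_value
--             changeCount += 1
--         else:
--             if changeCount > 0:
--                 return i + 1
--             else:
--                 return None
--
-- def trim_floats_in_str(input_str):
--     digits = {str(i) for i in range(10)}
--     charList = [char for char in input_str]
--     digitRunLength = None
--     for i, char in enumerate(charList):
--         if char == ".":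
--             digitRunLength = 0
--         elif digitRunLength is not None:
--             if char in digits:
--                 digitRunLength += 1
--             else:
--                 lastChangedIndex = overwrite_matches_left(charList, i-1, "0", "")
--                 if lastChangedIndex is not None:
--                     assert lastChangedIndex > 0
--                     assert charList[lastChangedIndex] == ""
--                     if charList[lastChangedIndex - 1] == ".":
--                         charList[lastChangedIndex] = "0" # undo that change.
--                 digitRunLength = None
--     return "".join(charList)
-- ===== SOURCE B (Python) =====
-- def trim_floats_in_str(input_str):
--     # One forward pass: buffer the digit run after each '.', flush it trimmed
--     # at a non-digit terminator (keeping one '0' when the run was all zeros),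
--     # untrimmed at a second '.' or at end of string.
--     out = []
--     buf = None  # None = not inside a fractional run; else list of buffered digits
--     for ch in input_str:
--         if ch == ".":
--             if buf is not None:
--                 out.extend(buf)  # run ends at another '.': emit untrimmed
--             out.append(".")
--             buf = []
--         elif buf is None:
--             out.append(ch)
--         elif ch in "0123456789":
--             buf.append(ch)
--         else:
--             t = "".join(buf).rstrip("0")
--             if buf and not t:
--                 t = "0"
--             out.append(t)
--             out.append(ch)
--             buf = None
--     if buf is not None:
--         out.extend(buf)  # run ends at end of string: emit untrimmed
--     return "".join(out)
-- ===== Notes on version B (the rewrite author's own statement) =====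
-- stated objective: simpler
-- what changed: A mutates a list of one-char strings with a backwards zero-overwriting scan (overwrite_matches_left) plus an undo-write; B is a single forward pass that buffers each fractional digit run and emits it trimmed (or untrimmed at a second '.' / end of string), with no mutation and no inner backwards scan.
import Mathlib
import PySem

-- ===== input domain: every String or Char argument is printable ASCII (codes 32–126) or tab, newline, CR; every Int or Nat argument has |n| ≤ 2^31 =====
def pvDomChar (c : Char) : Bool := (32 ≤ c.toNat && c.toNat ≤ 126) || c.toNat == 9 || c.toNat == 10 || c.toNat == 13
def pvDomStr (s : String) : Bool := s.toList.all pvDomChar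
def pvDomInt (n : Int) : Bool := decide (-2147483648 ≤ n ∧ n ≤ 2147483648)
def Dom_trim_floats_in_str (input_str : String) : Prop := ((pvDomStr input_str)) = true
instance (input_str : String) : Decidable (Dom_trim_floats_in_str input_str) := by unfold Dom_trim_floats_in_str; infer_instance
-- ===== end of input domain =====

-- B replaces A's in-place char-list surgery (backwards zero-overwriting scan plus an
-- "undo" write) by a single forward pass that buffers each fractional digit run
-- ("simpler"; no speed claim).

-- ===== PORT A =====
-- A works on a Python list of one-character strings, some of which become "" when
-- overwritten; each cell is modelled as its character list ("" = [], "0" = ['0']),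
-- so "".join(charList) is the flatten of the cells.

-- digits = {str(i) for i in range(10)}  (str(i) as its character list)
def pvDigits : PySem.Set (List Char) :=
  PySem.Set.ofList ((PySem.List.pyRange 0 10 1).map (fun i => PySem.Int.toChars i))

-- the 'for i in range(index, -1, -1)' loop of overwrite_matches_left with its early
-- returns; falling off the loop is Python's implicit 'return None'.  input_list[i] is
-- always in range in A's calls (i counts down from a position < len and the scan stops
-- at the run's '.'), so pyGetD/pySetD are its total forms.
def owml_go (input_list : List (List Char)) (i : Int) (test_value new_value : List Char)
    (changeCount : Int) : List (List Char) × Option Int :=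
  if _h : i < 0 then (input_list, none)
  else
    if PySem.List.pyGetD input_list i [] == test_value then
      owml_go (PySem.List.pySetD input_list i new_value) (i - 1) test_value new_value
        (changeCount + 1)
    else
      if changeCount > 0 then (input_list, some (i + 1)) else (input_list, none)
termination_by (i + 1).toNat
decreasing_by omega

def overwrite_matches_left (input_list : List (List Char)) (index : Int)
    (test_value new_value : List Char) : List (List Char) × Option Int :=
  owml_go input_list index test_value new_value 0

-- the 'for i, char in enumerate(charList)' loop; the in-place writes only touch
-- indices < i and never change the length, so the iteration bound n stays the original
-- length and the current character is charList[i] of the mutated list.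
def trim_go (n : Nat) (charList : List (List Char)) (i : Nat) (digitRunLength : Option Int) :
    List (List Char) :=
  if _h : i < n then
    let char := PySem.List.pyGetD charList ((i : Nat) : Int) []
    if char == ['.'] then
      trim_go n charList (i + 1) (some 0)
    else
      match digitRunLength with
      | none => trim_go n charList (i + 1) none
      | some d =>
        if PySem.Set.contains pvDigits char then
          trim_go n charList (i + 1) (some (d + 1))
        else
          let r := overwrite_matches_left charList (((i : Nat) : Int) - 1) ['0'] []
          let charList' :=
            match r.2 with
            | none => r.1
            | some lastChangedIndex =>
              -- (A's asserts hold whenever this branch is reached and are no-ops)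
              if PySem.List.pyGetD r.1 (lastChangedIndex - 1) [] == ['.'] then
                PySem.List.pySetD r.1 lastChangedIndex ['0']   -- undo that change
              else r.1
          trim_go n charList' (i + 1) none
  else charList
termination_by n - i

def trim_floats_in_str (input_str : String) : String :=
  let charList := input_str.toList.map (fun c => [c])
  String.ofList (trim_go charList.length charList 0 none).flatten

-- ===== PORT B =====

def pvDigitChars : List Char := "0123456789".toList

-- "".join(buf).rstrip("0")
def pvRstripZeros (b : List Char) : List Char :=
  (b.reverse.dropWhile (fun c => c == '0')).reverse

def alt_go : List Char → List Char → Option (List Char) → List Char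
  | [], out, buf => match buf with | none => out | some b => out ++ b
  | ch :: rest, out, buf =>
    if ch == '.' then
      alt_go rest ((match buf with | none => out | some b => out ++ b) ++ ['.']) (some [])
    else
      match buf with
      | none => alt_go rest (out ++ [ch]) none
      | some b =>
        if ch ∈ pvDigitChars then alt_go rest out (some (b ++ [ch]))
        else
          let t := pvRstripZeros b
          let t := if b ≠ [] ∧ t = [] then ['0'] else t
          alt_go rest (out ++ t ++ [ch]) none

def trim_floats_in_str_alt (input_str : String) : String :=
  String.ofList (alt_go input_str.toList [] none)

-- ===== PRECONDITION & SPEC =====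
def Spec_trim_floats_in_str (input_str : String) (out : String) : Prop := out = trim_floats_in_str_alt input_str
instance (input_str : String) (out : String) : Decidable (Spec_trim_floats_in_str input_str out) := by unfold Spec_trim_floats_in_str; infer_instance

-- ===== CLAIM (what is proved, stated in full; the proofs are below) =====
def Claim_equal_trim_floats_in_str : Prop := ∀ (input_str : String), Dom_trim_floats_in_str input_str → Spec_trim_floats_in_str input_str (trim_floats_in_str input_str)

-- ===== LEMMAS AND PROOFS =====

lemma rz_append_zero (ys : List Char) : pvRstripZeros (ys ++ ['0']) = pvRstripZeros ys := by
  simp [pvRstripZeros]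

lemma rz_append_ne (ys : List Char) (z : Char) (h : z ≠ '0') :
    pvRstripZeros (ys ++ [z]) = ys ++ [z] := by
  simp [pvRstripZeros, h]

lemma rz_length_le (b : List Char) : (pvRstripZeros b).length ≤ b.length := by
  simpa [pvRstripZeros] using List.length_dropWhile_le (fun c => c == '0') b.reverse

lemma rz_spec (b : List Char) :
    b = pvRstripZeros b ++ List.replicate (b.length - (pvRstripZeros b).length) '0' := by
  have h1 : b.reverse.takeWhile (fun c => c == '0') ++ b.reverse.dropWhile (fun c => c == '0') = b.reverse :=
    List.takeWhile_append_dropWhile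
  have h2 : b.reverse.takeWhile (fun c => c == '0') = List.replicate (b.reverse.takeWhile (fun c => c == '0')).length '0' := by
    apply List.eq_replicate_of_mem
    intro c hc
    simpa using List.mem_takeWhile_imp hc
  have h3 : b = pvRstripZeros b ++ (b.reverse.takeWhile (fun c => c == '0')).reverse := by
    have h := congrArg List.reverse h1
    rw [List.reverse_append, List.reverse_reverse] at h
    simp only [pvRstripZeros]
    exact h.symm
  have h4 : (b.reverse.takeWhile (fun c => c == '0')).length = b.length - (pvRstripZeros b).length := by
    have h5 := congrArg List.length h1
    simp only [List.length_append, List.length_reverse] at h5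
    simp only [pvRstripZeros, List.length_reverse]
    omega
  calc b = pvRstripZeros b ++ (b.reverse.takeWhile (fun c => c == '0')).reverse := h3
    _ = _ := by rw [h2]; simp [h4]

lemma rz_mem (b : List Char) (c : Char) (h : c ∈ pvRstripZeros b) : c ∈ b := by
  simp [pvRstripZeros] at h
  exact List.mem_reverse.mp ((List.dropWhile_sublist _).mem h)

lemma flatten_map_sing (b : List Char) : (b.map (fun c => ([c] : List Char))).flatten = b := by
  induction b with
  | nil => rfl
  | cons x xs ih => simp [ih]

lemma digits_eq : pvDigits = [['0'],['1'],['2'],['3'],['4'],['5'],['6'],['7'],['8'],['9']] := by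
  decide

lemma digits_iff (c : Char) :
    PySem.Set.contains pvDigits [c] = true ↔ c ∈ pvDigitChars := by
  rw [PySem.Set.contains_iff, digits_eq]
  show _ ↔ c ∈ ("0123456789".toList)
  simp

lemma pyGetD_mid (xs ys : List (List Char)) (y d : List Char) :
    PySem.List.pyGetD (xs ++ y :: ys) ((xs.length : Nat) : Int) d = y := by
  simp [List.getD]

lemma pySetD_mid (xs ys : List (List Char)) (y v : List Char) :
    PySem.List.pySetD (xs ++ y :: ys) ((xs.length : Nat) : Int) v = xs ++ v :: ys := by
  simp [List.set_append_right]

lemma pyGetD_mid' (xs ys : List (List Char)) (y d : List Char) (j : Nat) (hj : xs.length = j) :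
    PySem.List.pyGetD (xs ++ y :: ys) ((j : Nat) : Int) d = y := by
  subst hj; exact pyGetD_mid xs ys y d

lemma flatten_replicate_nil (n : Nat) : (List.replicate n ([] : List Char)).flatten = [] := by
  induction n with
  | zero => rfl
  | succ m ih => simp [List.replicate_succ, ih]

lemma sing_beq (c d : Char) : (([c] : List Char) == [d]) = (c == d) := by
  by_cases h : c = d <;> simp [h]

lemma dot_not_digit : '.' ∉ pvDigitChars := by decide

lemma alt_go_nil (out : List Char) (buf : Option (List Char)) :
    alt_go [] out buf = match buf with | none => out | some b => out ++ b := by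
  cases buf <;> rfl

lemma alt_go_cons_none (ch : Char) (rest out : List Char) :
    alt_go (ch :: rest) out none =
      if ch == '.' then alt_go rest (out ++ ['.']) (some [])
      else alt_go rest (out ++ [ch]) none := rfl

lemma alt_go_cons_some (ch : Char) (rest out b : List Char) :
    alt_go (ch :: rest) out (some b) =
      if ch == '.' then alt_go rest ((out ++ b) ++ ['.']) (some [])
      else if ch ∈ pvDigitChars then alt_go rest out (some (b ++ [ch]))
      else alt_go rest
        (out ++ (if b ≠ [] ∧ pvRstripZeros b = [] then ['0'] else pvRstripZeros b) ++ [ch])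
        none := rfl

-- the backwards scan on a run: pre ends with the '.' cell, b is the buffered digit run
lemma owml_run (b : List Char) (pre rest : List (List Char)) (k : Int)
    (hpre : pre.getLast? = some ['.']) (hk : 0 ≤ k) :
    owml_go (pre ++ b.map (fun c => [c]) ++ rest) ((pre.length : Int) + b.length - 1)
      ['0'] [] k
    = (pre ++ (pvRstripZeros b).map (fun c => [c])
         ++ List.replicate (b.length - (pvRstripZeros b).length) ([] : List Char) ++ rest,
       if 0 < k ∨ (pvRstripZeros b).length < b.length
       then some ((pre.length : Int) + (pvRstripZeros b).length) else none) := by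
  induction b using List.reverseRecOn generalizing rest k with
  | nil =>
    obtain ⟨ys, hys⟩ := List.getLast?_eq_some_iff.mp hpre
    subst hys
    rw [owml_go]
    have h0 : ((ys ++ [['.']]).length : Int) + ([] : List Char).length - 1 = (ys.length : Int) := by
      simp
    rw [h0]
    have hcell : PySem.List.pyGetD ((ys ++ [['.']]) ++ ([] : List Char).map (fun c => [c]) ++ rest) ((ys.length : Nat) : Int) [] = ['.'] := by
      have : (ys ++ [['.']]) ++ ([] : List Char).map (fun c => [c]) ++ rest = ys ++ ['.'] :: rest := by simp
      rw [this, pyGetD_mid]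
    rw [hcell]
    simp [pvRstripZeros]
    split_ifs with h1 h2 h3 <;> simp_all <;> omega
  | append_singleton ys z ih =>
    by_cases hz : z = '0'
    · subst hz
      rw [owml_go]
      have hpos : ¬ ((pre.length : Int) + (ys ++ ['0']).length - 1 < 0) := by
        have : pre ≠ [] := by intro h; simp [h] at hpre
        have : 0 < pre.length := List.length_pos_iff.mpr this
        simp; omega
      rw [dif_neg hpos]
      have hidx : (pre.length : Int) + (ys ++ ['0']).length - 1 = (((pre ++ ys.map (fun c => [c])).length : Nat) : Int) := by
        simp; omega
      have hsplit : pre ++ (ys ++ ['0']).map (fun c => [c]) ++ rest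
          = (pre ++ ys.map (fun c => [c])) ++ ['0'] :: rest := by simp
      rw [hidx, hsplit, pyGetD_mid, pySetD_mid]
      simp only [BEq.rfl, if_pos]
      have hidx2 : (((pre ++ ys.map (fun c => [c])).length : Nat) : Int) - 1 = (pre.length : Int) + ys.length - 1 := by
        push_cast [List.length_append, List.length_map]; ring
      rw [hidx2, ih (([] : List Char) :: rest) (k + 1) (by omega)]
      have hlen : (pvRstripZeros ys).length ≤ ys.length := rz_length_le ys
      rw [rz_append_zero]
      have hcond : (0 < k + 1 ∨ (pvRstripZeros ys).length < ys.length) = True := by simp; omega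
      have hcond2 : (0 < k ∨ (pvRstripZeros ys).length < (ys ++ ['0']).length) = True := by
        simp; omega
      simp only [hcond, hcond2, if_true]
      have hlen2 : (ys ++ ['0']).length - (pvRstripZeros ys).length
          = (ys.length - (pvRstripZeros ys).length) + 1 := by simp; omega
      rw [hlen2, List.replicate_succ']
      simp
    · rw [owml_go]
      have hpos : ¬ ((pre.length : Int) + (ys ++ [z]).length - 1 < 0) := by
        have : pre ≠ [] := by intro h; simp [h] at hpre
        have : 0 < pre.length := List.length_pos_iff.mpr this
        simp; omega
      rw [dif_neg hpos]
      have hidx : (pre.length : Int) + (ys ++ [z]).length - 1 = (((pre ++ ys.map (fun c => [c])).length : Nat) : Int) := by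
        simp; omega
      have hsplit : pre ++ (ys ++ [z]).map (fun c => [c]) ++ rest
          = (pre ++ ys.map (fun c => [c])) ++ [z] :: rest := by simp
      rw [hidx, hsplit, pyGetD_mid]
      have hne : (([z] : List Char) == ['0']) = false := by
        simp [hz]
      rw [hne]
      simp only [Bool.false_eq_true, if_false]
      rw [rz_append_ne ys z hz]
      split_ifs with h1 h2 <;> simp_all <;> try omega

-- main simulation: A's mutated cell list is pre ++ buffered digit cells ++ untouched suffix
lemma sim (s : List Char) : ∀ (k i : Nat) (pre : List (List Char)) (buf : Option (List Char)),
    s.length - i = k →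
    i = pre.length + (buf.getD []).length →
    (buf.isSome = true → pre.getLast? = some ['.']) →
    (∀ c ∈ buf.getD [], c ∈ pvDigitChars) →
    (trim_go s.length
        (pre ++ (buf.getD []).map (fun c => [c]) ++ (s.drop i).map (fun c => [c])) i
        (buf.map (fun b => (b.length : Int)))).flatten
      = alt_go (s.drop i) pre.flatten buf := by
  intro k
  induction k with
  | zero =>
    intro i pre buf hk hi hdot hdig
    have hige : s.length ≤ i := by omega
    rw [trim_go, dif_neg (by omega), List.drop_eq_nil_of_le hige]
    cases buf with
    | none => simp [alt_go_nil, flatten_map_sing]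
    | some b => simp [alt_go_nil, flatten_map_sing]
  | succ k ihk =>
    intro i pre buf hk hi hdot hdig
    have hilt : i < s.length := by omega
    have hdrop : s.drop i = s[i] :: s.drop (i + 1) := List.drop_eq_getElem_cons hilt
    cases buf with
    | none =>
      simp only [Option.getD_none, List.map_nil, List.append_nil, Option.map_none, List.length_nil,
        Nat.add_zero] at hi hdot hdig ⊢
      have hcell : PySem.List.pyGetD (pre ++ (s.drop i).map (fun c => ([c] : List Char)))
          ((i : Nat) : Int) [] = [s[i]] := by
        rw [hdrop, List.map_cons]
        exact pyGetD_mid' pre _ _ _ i (by omega)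
      rw [trim_go, dif_pos hilt]
      simp only [hcell]
      conv_rhs => rw [hdrop, alt_go_cons_none]
      by_cases hcdot : s[i] = '.'
      · conv_lhs => rw [if_pos (show ([s[i]] == ['.']) = true by simp [hcdot])]
        conv_rhs => rw [if_pos (show (s[i] == '.') = true by simp [hcdot])]
        have hrec := ihk (i + 1) (pre ++ [['.']]) (some [])
          (by omega)
          (by simp; omega)
          (by intro _; simp)
          (by intro x hx; simp at hx)
        simp only [Option.getD_some, List.map_nil, List.append_nil, Option.map_some,
          List.length_nil, Nat.cast_zero] at hrec
        have harg : (pre ++ [['.']]) ++ (s.drop (i + 1)).map (fun c => ([c] : List Char))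
            = pre ++ (s.drop i).map (fun c => ([c] : List Char)) := by
          rw [hdrop]
          simp only [List.map_cons, List.map_append, List.append_assoc, List.singleton_append, List.cons_append, List.nil_append, List.map_nil, List.append_nil]
          try rw [hcdot]
        rw [harg] at hrec
        rw [hrec]
        congr 1
        simp
      · conv_lhs => rw [if_neg (show ¬ ([s[i]] == ['.']) = true by simp [sing_beq, hcdot])]
        conv_rhs => rw [if_neg (show ¬ (s[i] == '.') = true by simp [hcdot])]
        have hrec := ihk (i + 1) (pre ++ [[s[i]]]) none
          (by omega)
          (by simp; omega)
          (by intro h; simp at h)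
          (by intro x hx; simp at hx)
        simp only [Option.getD_none, List.map_nil, List.append_nil, Option.map_none] at hrec
        have harg : (pre ++ [[s[i]]]) ++ (s.drop (i + 1)).map (fun c => ([c] : List Char))
            = pre ++ (s.drop i).map (fun c => ([c] : List Char)) := by
          rw [hdrop]
          simp only [List.map_cons, List.map_append, List.append_assoc, List.singleton_append, List.cons_append, List.nil_append, List.map_nil, List.append_nil]
          try rw [hcdot]
        rw [harg] at hrec
        rw [hrec]
        congr 1
        simp
    | some b =>
      simp only [Option.getD_some, Option.map_some] at hi hdot hdig ⊢
      have hpredot : pre.getLast? = some ['.'] := hdot rfl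
      have hcell : PySem.List.pyGetD
          (pre ++ b.map (fun c => ([c] : List Char)) ++ (s.drop i).map (fun c => ([c] : List Char)))
          ((i : Nat) : Int) [] = [s[i]] := by
        rw [hdrop, List.map_cons]
        exact pyGetD_mid' (pre ++ b.map (fun c => ([c] : List Char))) _ _ _ i (by simp; omega)
      rw [trim_go, dif_pos hilt]
      simp only [hcell]
      conv_rhs => rw [hdrop, alt_go_cons_some]
      by_cases hcdot : s[i] = '.'
      · conv_lhs => rw [if_pos (show ([s[i]] == ['.']) = true by simp [hcdot])]
        conv_rhs => rw [if_pos (show (s[i] == '.') = true by simp [hcdot])]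
        have hrec := ihk (i + 1) (pre ++ b.map (fun c => ([c] : List Char)) ++ [['.']]) (some [])
          (by omega)
          (by simp; omega)
          (by intro _; simp)
          (by intro x hx; simp at hx)
        simp only [Option.getD_some, List.map_nil, List.append_nil, Option.map_some,
          List.length_nil, Nat.cast_zero] at hrec
        have harg : (pre ++ b.map (fun c => ([c] : List Char)) ++ [['.']]) ++ (s.drop (i + 1)).map (fun c => ([c] : List Char))
            = pre ++ b.map (fun c => ([c] : List Char)) ++ (s.drop i).map (fun c => ([c] : List Char)) := by
          rw [hdrop]
          simp only [List.map_cons, List.map_append, List.append_assoc, List.singleton_append, List.cons_append, List.nil_append, List.map_nil, List.append_nil]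
          try rw [hcdot]
        rw [harg] at hrec
        rw [hrec]
        congr 1
        simp [flatten_map_sing]
      · conv_lhs => rw [if_neg (show ¬ ([s[i]] == ['.']) = true by simp [sing_beq, hcdot])]
        conv_rhs => rw [if_neg (show ¬ (s[i] == '.') = true by simp [hcdot])]
        by_cases hcd : s[i] ∈ pvDigitChars
        · conv_lhs => rw [if_pos ((digits_iff _).mpr hcd)]
          conv_rhs => rw [if_pos hcd]
          have hrec := ihk (i + 1) pre (some (b ++ [s[i]]))
            (by omega)
            (by simp; omega)
            (by intro _; exact hpredot)
            (by intro x hx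
                rcases List.mem_append.mp hx with hx | hx
                · exact hdig x hx
                · simp at hx; subst hx; exact hcd)
          simp only [Option.getD_some, Option.map_some] at hrec
          have harg : pre ++ (b ++ [s[i]]).map (fun c => ([c] : List Char)) ++ (s.drop (i + 1)).map (fun c => ([c] : List Char))
              = pre ++ b.map (fun c => ([c] : List Char)) ++ (s.drop i).map (fun c => ([c] : List Char)) := by
            rw [hdrop]
            simp only [List.map_cons, List.map_append, List.append_assoc, List.singleton_append, List.cons_append, List.nil_append, List.map_nil, List.append_nil]
            try rw [hcdot]
          rw [harg] at hrec
          have hcast : ((b ++ [s[i]]).length : Int) = (b.length : Int) + 1 := by simp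
          rw [hcast] at hrec
          rw [hrec]
        · conv_lhs => rw [if_neg (show ¬ (PySem.Set.contains pvDigits [s[i]]) = true by rw [digits_iff]; exact hcd)]
          conv_rhs => rw [if_neg hcd]
          -- terminator: backwards scan
          simp only [overwrite_matches_left]
          have hidx : (((i : Nat) : Int)) - 1 = (pre.length : Int) + (b.length : Int) - 1 := by
            omega
          rw [hidx, owml_run b pre _ 0 hpredot le_rfl]
          have hble := rz_length_le b
          set b1 := pvRstripZeros b with hb1
          set z := b.length - b1.length with hz
          by_cases hzpos : b1.length < b.length
          · -- trailing zeros were overwritten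
            rw [if_pos (Or.inr hzpos)]
            simp only []
            by_cases hb1nil : b1 = []
            · -- whole run was zeros: the undo-write fires
              obtain ⟨ps, hps⟩ := List.getLast?_eq_some_iff.mp hpredot
              have hread : PySem.List.pyGetD
                  (pre ++ b1.map (fun c => ([c] : List Char)) ++ List.replicate z ([] : List Char) ++ (s.drop i).map (fun c => ([c] : List Char)))
                  ((pre.length : Int) + (b1.length : Int) - 1) [] = ['.'] := by
                rw [hb1nil]
                simp only [List.map_nil, List.append_nil, List.length_nil, Nat.cast_zero, add_zero]
                have h1 : (pre.length : Int) - 1 = ((ps.length : Nat) : Int) := by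
                  rw [hps]; simp
                have h2 : pre ++ List.replicate z ([] : List Char) ++ (s.drop i).map (fun c => ([c] : List Char))
                    = ps ++ ['.'] :: (List.replicate z ([] : List Char) ++ (s.drop i).map (fun c => ([c] : List Char))) := by
                  rw [hps]; simp
                rw [h2, h1, pyGetD_mid]
              rw [hread]
              rw [if_pos (show ((['.'] : List Char) == ['.']) = true by decide)]
              -- the set: position pre.length is the first replicate cell
              have hzpos' : 0 < z := by omega
              have hset : PySem.List.pySetD
                  (pre ++ b1.map (fun c => ([c] : List Char)) ++ List.replicate z ([] : List Char) ++ (s.drop i).map (fun c => ([c] : List Char)))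
                  ((pre.length : Int) + (b1.length : Int)) ['0']
                  = pre ++ ['0'] :: (List.replicate (z - 1) ([] : List Char) ++ (s.drop i).map (fun c => ([c] : List Char))) := by
                rw [hb1nil]
                simp only [List.map_nil, List.append_nil, List.length_nil, Nat.cast_zero, add_zero]
                rw [show z = z - 1 + 1 by omega, List.replicate_succ]
                rw [show pre ++ ([] : List Char) :: List.replicate (z-1) ([] : List Char) ++ (s.drop i).map (fun c => ([c] : List Char))
                    = pre ++ ([] : List Char) :: (List.replicate (z-1) ([] : List Char) ++ (s.drop i).map (fun c => ([c] : List Char))) by simp]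
                rw [show ((pre.length : Nat) : Int) = ((pre.length : Nat) : Int) from rfl]
                exact pySetD_mid pre _ _ _
              rw [hset]
              -- now recurse
              have hrec := ihk (i + 1) (pre ++ [['0']] ++ List.replicate (z - 1) ([] : List Char) ++ [[s[i]]]) none
                (by omega)
                (by have hzb : z = b.length := by rw [hb1nil] at hz; simpa using hz
                    simp only [List.length_append, List.length_cons, List.length_nil,
                      List.length_replicate, Option.getD_none, Nat.add_zero]
                    omega)
                (by intro h; simp at h)
                (by intro x hx; simp at hx)
              simp only [Option.getD_none, List.map_nil, List.append_nil, Option.map_none] at hrec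
              have harg : (pre ++ [['0']] ++ List.replicate (z - 1) ([] : List Char) ++ [[s[i]]]) ++ (s.drop (i + 1)).map (fun c => ([c] : List Char))
                  = pre ++ ['0'] :: (List.replicate (z - 1) ([] : List Char) ++ (s.drop i).map (fun c => ([c] : List Char))) := by
                rw [hdrop]
                simp only [List.map_cons, List.map_append, List.append_assoc, List.singleton_append, List.cons_append, List.nil_append, List.map_nil, List.append_nil]
                try rw [hcdot]
              rw [harg] at hrec
              rw [hrec]
              have hbne : b ≠ [] := by intro h; rw [h] at hzpos; simp at hzpos
              rw [if_pos ⟨hbne, hb1nil⟩]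
              simp [flatten_replicate_nil]
            · -- run ends in a non-zero digit: no undo
              obtain ⟨b1', d, hb1'⟩ := (List.eq_nil_or_concat b1).resolve_left hb1nil
              rw [List.concat_eq_append] at hb1'
              have hdmem : d ∈ pvDigitChars := hdig d (rz_mem b d (by rw [← hb1, hb1']; simp))
              have hdne : d ≠ '.' := by intro h; rw [h] at hdmem; exact dot_not_digit hdmem
              have hread : PySem.List.pyGetD
                  (pre ++ b1.map (fun c => ([c] : List Char)) ++ List.replicate z ([] : List Char) ++ (s.drop i).map (fun c => ([c] : List Char)))
                  ((pre.length : Int) + (b1.length : Int) - 1) [] = [d] := by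
                rw [hb1']
                have h1 : (pre.length : Int) + ((b1' ++ [d]).length : Int) - 1 = (((pre ++ b1'.map (fun c => ([c] : List Char))).length : Nat) : Int) := by
                  simp; omega
                rw [h1]
                rw [show pre ++ (b1' ++ [d]).map (fun c => ([c] : List Char)) ++ List.replicate z ([] : List Char) ++ (s.drop i).map (fun c => ([c] : List Char))
                    = (pre ++ b1'.map (fun c => ([c] : List Char))) ++ ([d] : List Char) :: (List.replicate z ([] : List Char) ++ (s.drop i).map (fun c => ([c] : List Char))) by simp]
                exact pyGetD_mid _ _ _ _
              rw [hread]
              rw [if_neg (by simp [sing_beq, hdne])]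
              have hrec := ihk (i + 1) (pre ++ b1.map (fun c => ([c] : List Char)) ++ List.replicate z ([] : List Char) ++ [[s[i]]]) none
                (by omega)
                (by simp; omega)
                (by intro h; simp at h)
                (by intro x hx; simp at hx)
              simp only [Option.getD_none, List.map_nil, List.append_nil, Option.map_none] at hrec
              have harg : (pre ++ b1.map (fun c => ([c] : List Char)) ++ List.replicate z ([] : List Char) ++ [[s[i]]]) ++ (s.drop (i + 1)).map (fun c => ([c] : List Char))
                  = pre ++ b1.map (fun c => ([c] : List Char)) ++ List.replicate z ([] : List Char) ++ (s.drop i).map (fun c => ([c] : List Char)) := by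
                rw [hdrop]
                simp only [List.map_cons, List.map_append, List.append_assoc, List.singleton_append, List.cons_append, List.nil_append, List.map_nil, List.append_nil]
                try rw [hcdot]
              rw [harg] at hrec
              rw [hrec]
              rw [if_neg (by rintro ⟨_, h⟩; exact hb1nil h)]
              simp [flatten_replicate_nil, flatten_map_sing]
          · -- no trailing zeros: nothing changed
            rw [if_neg (by rintro (h | h); omega; omega)]
            simp only []
            have hb1b : b1 = b := by
              have hspec := rz_spec b
              rw [← hb1, ← hz] at hspec
              have hz0 : z = 0 := by omega
              rw [hz0] at hspec
              simpa using hspec.symm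
            have hz0 : z = 0 := by omega
            rw [hz0, hb1b]
            simp only [List.replicate_zero, List.nil_append, List.append_nil]
            have hrec := ihk (i + 1) (pre ++ b.map (fun c => ([c] : List Char)) ++ [[s[i]]]) none
              (by omega)
              (by simp; omega)
              (by intro h; simp at h)
              (by intro x hx; simp at hx)
            simp only [Option.getD_none, List.map_nil, List.append_nil, Option.map_none] at hrec
            have harg : (pre ++ b.map (fun c => ([c] : List Char)) ++ [[s[i]]]) ++ (s.drop (i + 1)).map (fun c => ([c] : List Char))
                = pre ++ b.map (fun c => ([c] : List Char)) ++ (s.drop i).map (fun c => ([c] : List Char)) := by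
              rw [hdrop]
              simp only [List.map_cons, List.map_append, List.append_assoc, List.singleton_append, List.cons_append, List.nil_append, List.map_nil, List.append_nil]
            rw [harg] at hrec
            rw [hrec]
            rw [if_neg (by rintro ⟨hne, hnil⟩; exact hne hnil)]
            congr 1
            simp [flatten_map_sing]

-- ===== VERDICT (by name: the statement is the Claim_ definition above) =====
theorem trim_floats_in_str_spec : Claim_equal_trim_floats_in_str := by
  intro input_str _
  unfold Spec_trim_floats_in_str trim_floats_in_str trim_floats_in_str_alt
  have h := sim input_str.toList input_str.toList.length 0 [] none (by omega) (by simp)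
    (by intro hx; simp at hx) (by intro x hx; simp at hx)
  simp only [List.drop_zero, Option.getD_none, List.map_nil, List.nil_append,
    Option.map_none, List.flatten_nil] at h
  show String.ofList (trim_go (input_str.toList.map (fun c => [c])).length
      (input_str.toList.map (fun c => [c])) 0 none).flatten
    = String.ofList (alt_go input_str.toList [] none)
  rw [List.length_map, h]
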